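-- pv_equiv track=rewrite | github.com/sanjay-chivukula/advent-of-code-2023 | day-02/part_02.py | min_required_dice
-- ===== SOURCE A (Python) =====
-- def min_required_dice(game_data):
--     min_dice_limits = {}
--     for turn in game_data:
--         for color, count in turn.items():
--             if color not in min_dice_limits:
--                 min_dice_limits[color] = count
--             else:
--                 min_dice_limits[color] = max(min_dice_limits[color], count)
--     return min_dice_limits
-- ===== SOURCE B (Python) =====
-- def min_required_dice(game_data):
--     # Pass 1: gather every observed count per color into an index of lists.
--     index = {}
--     for turn in game_data:
--         for color, count in turn.items():
--             index.setdefault(color, []).append(count)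
--     # Pass 2: reduce each list to its maximum.
--     return {color: max(counts) for color, counts in index.items()}
-- ===== Notes on version B (the rewrite author's own statement) =====
-- stated objective: alternative
-- what changed: Replaces A's single running-max dict update with two distinct passes: first building an index dict mapping each color to the list of all its counts, then a separate dict comprehension reducing each list with max().
import Mathlib
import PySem

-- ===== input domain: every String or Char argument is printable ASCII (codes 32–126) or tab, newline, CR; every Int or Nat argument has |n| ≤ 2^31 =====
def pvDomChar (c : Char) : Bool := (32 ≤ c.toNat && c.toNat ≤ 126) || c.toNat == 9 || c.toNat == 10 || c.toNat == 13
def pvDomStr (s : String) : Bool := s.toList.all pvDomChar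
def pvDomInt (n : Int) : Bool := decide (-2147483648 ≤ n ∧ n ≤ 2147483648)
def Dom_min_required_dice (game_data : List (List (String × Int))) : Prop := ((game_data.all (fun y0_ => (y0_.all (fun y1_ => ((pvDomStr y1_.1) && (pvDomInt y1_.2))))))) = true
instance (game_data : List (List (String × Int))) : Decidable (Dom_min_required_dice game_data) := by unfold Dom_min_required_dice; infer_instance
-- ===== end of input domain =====

-- B differs from A by decomposition: A keeps a running max per color in one pass; B first
-- gathers all counts per color into an index of lists, then reduces each list with max().

-- ===== PORT A =====
-- one running-max step of A's inner loop body
def pvStepA (d : PySem.Dict String Int) (p : String × Int) : PySem.Dict String Int :=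
  if !(d.contains p.1) then d.insert p.1 p.2
  else d.insert p.1 (max (d.getD p.1 0) p.2)   -- d[p.1] exists in this branch, so getD's 0 is never used

def min_required_dice (game_data : List (List (String × Int))) : List (String × Int) :=
  (game_data.foldl (fun d turn => turn.foldl pvStepA d) PySem.Dict.empty).items

-- ===== PORT B =====
-- one index-building step of B's inner loop body (index.setdefault(color, []).append(count))
def pvStepB (d : PySem.Dict String (List Int)) (p : String × Int) : PySem.Dict String (List Int) :=
  d.modify p.1 [] (· ++ [p.2])

def min_required_dice_alt (game_data : List (List (String × Int))) : List (String × Int) :=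
  let index := game_data.foldl (fun d turn => turn.foldl pvStepB d) PySem.Dict.empty
  -- max(counts): every list in the index is nonempty, so getD's 0 is never used
  index.items.map (fun p => (p.1, (PySem.List.max? p.2 (fun y => y)).getD 0))

-- ===== PRECONDITION & SPEC =====
def Spec_min_required_dice (game_data : List (List (String × Int))) (out : List (String × Int)) : Prop := out = min_required_dice_alt game_data
instance (game_data : List (List (String × Int))) (out : List (String × Int)) : Decidable (Spec_min_required_dice game_data out) := by unfold Spec_min_required_dice; infer_instance

-- ===== CLAIM (what is proved, stated in full; the proofs are below) =====
def Claim_equal_min_required_dice : Prop := ∀ (game_data : List (List (String × Int))), Dom_min_required_dice game_data → Spec_min_required_dice game_data (min_required_dice game_data)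

-- ===== LEMMAS AND PROOFS =====

-- A's running max over a list of counts, starting from an optional current value
def pvRunMax : Option Int → List Int → Option Int
  | o, [] => o
  | none, n :: ns => pvRunMax (some n) ns
  | some m, n :: ns => pvRunMax (some (max m n)) ns

theorem pvRunMax_some (ns : List Int) (m : Int) : pvRunMax (some m) ns = some (ns.foldl max m) := by
  induction ns generalizing m with
  | nil => rfl
  | cons n ns ih => simp [pvRunMax, List.foldl, ih]

theorem pvStepA_get? (pairs : List (String × Int)) (d : PySem.Dict String Int) (c : String) :
    (pairs.foldl pvStepA d).get? c =
      pvRunMax (d.get? c) ((pairs.filter (fun p => p.1 == c)).map (·.2)) := by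
  induction pairs generalizing d with
  | nil => rfl
  | cons p ps ih =>
    obtain ⟨k, v⟩ := p
    by_cases hkc : k = c
    · subst hkc
      rw [List.foldl_cons, ih]
      have hfil : ((k, v) :: ps).filter (fun p => p.1 == k) = (k, v) :: ps.filter (fun p => p.1 == k) := by
        simp
      rw [hfil, List.map_cons]
      have hget : (pvStepA d (k, v)).get? k
          = some (match d.get? k with | none => v | some m => max m v) := by
        unfold pvStepA
        rw [PySem.Dict.contains_eq_isSome_get?]
        cases h : d.get? k <;>
          simp [PySem.Dict.get?_insert_self, PySem.Dict.getD_eq_get?_getD, h]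
      rw [hget]
      cases h : d.get? k <;> simp [pvRunMax]
    · have hbeq : (k == c) = false := by simpa using hkc
      simp only [List.foldl_cons, List.filter_cons, hbeq, ih]
      congr 1
      unfold pvStepA
      split <;> rw [PySem.Dict.get?_insert_of_ne _ _ (Ne.symm hkc)]

theorem pvStepB_getD (pairs : List (String × Int)) (d : PySem.Dict String (List Int)) (c : String) :
    (pairs.foldl pvStepB d).getD c [] = (d.getD c []) ++ ((pairs.filter (fun p => p.1 == c)).map (·.2)) :=
  PySem.Dict.getD_foldl_modify_append pairs d c

theorem pvStepA_eq_insert_form (pairs : List (String × Int)) :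
    pairs.foldl pvStepA PySem.Dict.empty
      = pairs.foldl (fun d p => d.insert p.1 (if !(d.contains p.1) then p.2 else max (d.getD p.1 0) p.2)) PySem.Dict.empty := by
  apply PySem.List.foldl_congr_mem
  intro d p _
  unfold pvStepA
  split <;> simp_all

theorem pv_keys_eq (pairs : List (String × Int)) :
    (pairs.foldl pvStepA PySem.Dict.empty).keys = (pairs.foldl pvStepB PySem.Dict.empty).keys := by
  rw [pvStepA_eq_insert_form,
    PySem.Dict.keys_foldl_insert_key pairs (fun p : String × Int => p.1) _ PySem.Dict.empty,
    show pairs.foldl pvStepB PySem.Dict.empty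
      = pairs.foldl (fun d p => d.modify p.1 [] (· ++ [p.2])) PySem.Dict.empty from rfl,
    PySem.Dict.keys_foldl_modify_key pairs (fun p : String × Int => p.1) [] _ PySem.Dict.empty]
  rfl

theorem pv_keysB (pairs : List (String × Int)) (c : String)
    (hc : c ∈ (pairs.foldl pvStepB PySem.Dict.empty).keys) : c ∈ pairs.map (·.1) := by
  rw [show pairs.foldl pvStepB PySem.Dict.empty
      = pairs.foldl (fun d p => d.modify p.1 [] (· ++ [p.2])) PySem.Dict.empty from rfl,
    PySem.Dict.keys_foldl_modify_key pairs (fun p : String × Int => p.1) [] _ PySem.Dict.empty] at hc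
  simpa [PySem.Set.update_nil_left, PySem.Set.mem_ofList] using hc

theorem pv_flatten_eq (game_data : List (List (String × Int))) :
    min_required_dice game_data = (game_data.flatten.foldl pvStepA PySem.Dict.empty).items ∧
    min_required_dice_alt game_data =
      (game_data.flatten.foldl pvStepB PySem.Dict.empty).items.map
        (fun p => (p.1, (PySem.List.max? p.2 (fun y => y)).getD 0)) := by
  constructor <;> simp [min_required_dice, min_required_dice_alt, List.foldl_flatten]

-- ===== VERDICT (by name: the statement is the Claim_ definition above) =====
theorem min_required_dice_spec : Claim_equal_min_required_dice := by
  intro game_data _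
  unfold Spec_min_required_dice
  obtain ⟨hA, hB⟩ := pv_flatten_eq game_data
  rw [hA, hB]
  set pairs := game_data.flatten with hp
  have hndA : (pairs.foldl pvStepA PySem.Dict.empty).keys.Nodup := by
    rw [pvStepA_eq_insert_form]
    exact PySem.Dict.nodup_keys_foldl_insert_key pairs _ _ _ PySem.Dict.nodup_keys_empty
  have hndB : (pairs.foldl pvStepB PySem.Dict.empty).keys.Nodup :=
    PySem.Dict.nodup_keys_foldl_modify_key pairs (fun p : String × Int => p.1) [] _ _ PySem.Dict.nodup_keys_empty
  rw [PySem.Dict.items_eq_map_keys _ hndA 0, PySem.Dict.items_eq_map_keys _ hndB [],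
    List.map_map, pv_keys_eq]
  apply List.map_congr_left
  intro c hc
  simp only [Function.comp]
  have hcounts : (pairs.foldl pvStepB PySem.Dict.empty).getD c []
      = (pairs.filter (fun p => p.1 == c)).map (·.2) := by
    rw [pvStepB_getD]; simp [PySem.Dict.getD_empty]
  have hgetA : (pairs.foldl pvStepA PySem.Dict.empty).getD c 0
      = (pvRunMax none ((pairs.filter (fun p => p.1 == c)).map (·.2))).getD 0 := by
    rw [PySem.Dict.getD_eq_get?_getD, pvStepA_get?, PySem.Dict.get?_empty]
  have hne : (pairs.filter (fun p => p.1 == c)).map (·.2) ≠ [] := by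
    have := pv_keysB pairs c hc
    simp only [List.mem_map] at this
    obtain ⟨p, hmem, hpc⟩ := this
    have : p ∈ pairs.filter (fun q => q.1 == c) := by
      simp [List.mem_filter, hmem, hpc]
    intro hnil
    rcases List.eq_nil_iff_forall_not_mem.mp (List.map_eq_nil_iff.mp hnil) p <| this
  cases hcs : (pairs.filter (fun p => p.1 == c)).map (·.2) with
  | nil => exact absurd hcs hne
  | cons n ns =>
    rw [hcounts, hcs, hgetA, hcs]
    simp [pvRunMax, pvRunMax_some, PySem.List.max?_id_cons]
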